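-- pv_equiv track=rewrite | github.com/CMakePP/CMakeTest | docs/source/conf.py | write_code
-- ===== SOURCE A (Python) =====
-- def strip_newline(block):
--     """
--     Strips any blank lines from the beginning and end of the block.
--     :param block: The block to parse.
--     :return: The block w/o the proceeding/trailing blank lines
--     """
--     start = 0
--     end = len(block)
--     for line in block:
--         if line.strip():
--             break
--         start += 1
--
--     # Early termination for empty block
--     if start == end:
--         return []
--
--     for line in reversed(block[start:]):
--         if line.strip():
--             break
--         end -= 1
--
--     return block[start: end]
--
-- def write_code(block, lang):
--     """
--     Given a code block from the parsed file this function will turn it into the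
--     corresponding  reST code. This function will automatically remove any
--     proceeding or trailing blank lines from the parsed code block.
--     :param block: The code block to print out.
--     :param lang: The language of the code snippet
--     :return: A string suitable for printing in a reST file
--     """
--     a_tab = " "*4
--
--     parsed_block = strip_newline(block)
--
--     if len(parsed_block) == 0:
--         return ""
--
--     # Assemble the actual code block
--     output = ".. code:: {}\n\n".format(lang)
--
--     for line in parsed_block:
--         output += a_tab + line
--     output += '\n'
--
--     return output
-- ===== SOURCE B (Python) =====
-- def write_code(block, lang):
--     """Single forward pass: collect non-blank-delimited body, buffering interior
--     blank lines and dropping leading/trailing ones, then join with the header."""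
--     body = []
--     pending = []
--     for line in block:
--         if line.strip():
--             body += pending
--             body.append(line)
--             pending = []
--         else:
--             if body:
--                 pending.append(line)
--     if not body:
--         return ""
--     return ".. code:: {}\n\n".format(lang) + "".join("    " + line for line in body) + "\n"
-- ===== Notes on version B (the rewrite author's own statement) =====
-- stated objective: alternative
-- what changed: Replaces A's helper that makes two separate scans (count leading blanks, then count trailing blanks over a reversed slice) plus slicing and per-line string += with one forward pass that accumulates the body directly, buffering interior blank lines and joining at the end.
import Mathlib
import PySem

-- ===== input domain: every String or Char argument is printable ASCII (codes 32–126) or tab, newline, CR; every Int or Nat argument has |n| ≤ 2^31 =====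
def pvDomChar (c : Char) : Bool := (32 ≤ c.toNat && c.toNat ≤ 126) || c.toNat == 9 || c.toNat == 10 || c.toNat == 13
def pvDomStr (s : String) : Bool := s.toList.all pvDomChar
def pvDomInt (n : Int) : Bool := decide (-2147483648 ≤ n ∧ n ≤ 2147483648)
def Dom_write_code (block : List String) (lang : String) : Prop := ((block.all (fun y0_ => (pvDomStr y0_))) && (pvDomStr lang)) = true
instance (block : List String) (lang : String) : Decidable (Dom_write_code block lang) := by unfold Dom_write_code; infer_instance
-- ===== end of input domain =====

-- B replaces A's two scans (count leading blanks, then count trailing blanks of a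
-- reversed slice) by one forward pass that accumulates the body, buffering interior
-- blank lines and never keeping leading/trailing ones; objective: alternative.

-- truthiness of `line.strip()` (shared predicate of both programs)
def pvBlank (s : String) : Bool := PySem.Str.strip s == ""

-- ===== PORT A =====
-- `for line in block: if line.strip(): break; start += 1` — counts leading blank lines
def pvCountBlanks : List String → Nat
  | [] => 0
  | l :: ls => if pvBlank l then pvCountBlanks ls + 1 else 0

def strip_newline (block : List String) : List String :=
  let start := pvCountBlanks block
  let end0 := block.length
  if start = end0 then []
  else
    -- second loop: `for line in reversed(block[start:]): if line.strip(): break; end -= 1`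
    let endv := end0 - pvCountBlanks (PySem.List.slice block (some (start : Int)) none).reverse
    PySem.List.slice block (some (start : Int)) (some (endv : Int))

def write_code (block : List String) (lang : String) : String :=
  let parsed := strip_newline block
  if parsed.length = 0 then ""
  else
    let output := ".. code:: " ++ lang ++ "\n\n"
    let output := parsed.foldl (fun acc l => acc ++ ("    " ++ l)) output
    output ++ "\n"

-- ===== PORT B =====
-- the single forward pass of Source B: state (body, pending)
def pvLoopB : List String → List String → List String → List String
  | [], body, _ => body
  | l :: ls, body, pending =>
    if pvBlank l then
      pvLoopB ls body (if body.isEmpty then pending else pending ++ [l])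
    else
      pvLoopB ls (body ++ pending ++ [l]) []

def write_code_alt (block : List String) (lang : String) : String :=
  let body := pvLoopB block [] []
  if body.isEmpty then ""
  else ".. code:: " ++ lang ++ "\n\n" ++ PySem.Str.join "" (body.map (fun l => "    " ++ l)) ++ "\n"

-- ===== PRECONDITION & SPEC =====
def Spec_write_code (block : List String) (lang : String) (out : String) : Prop := out = write_code_alt block lang
instance (block : List String) (lang : String) (out : String) : Decidable (Spec_write_code block lang out) := by unfold Spec_write_code; infer_instance

-- ===== CLAIM (what is proved, stated in full; the proofs are below) =====
def Claim_equal_write_code : Prop := ∀ (block : List String) (lang : String), Dom_write_code block lang → Spec_write_code block lang (write_code block lang)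

-- ===== LEMMAS AND PROOFS =====

-- the common trimmed block: drop leading blanks, then drop trailing blanks
def pvRtrim (l : List String) : List String := (l.reverse.dropWhile pvBlank).reverse
def pvTrim (l : List String) : List String := pvRtrim (l.dropWhile pvBlank)

theorem pvCountBlanks_eq (l : List String) :
    pvCountBlanks l = (l.takeWhile pvBlank).length := by
  induction l with
  | nil => rfl
  | cons x xs ih =>
      by_cases h : pvBlank x = true <;>
        simp [pvCountBlanks, h, ih]

theorem dropWhile_append_middle (p : String → Bool) (u w : List String) (l : String)
    (h : p l = false) :
    List.dropWhile p (u ++ l :: w) = List.dropWhile p u ++ l :: w := by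
  rw [List.dropWhile_append]
  split <;> simp_all [List.dropWhile_eq_nil_iff]

theorem pvRtrim_append_nonblank (u w : List String) (l : String) (h : pvBlank l = false) :
    pvRtrim (u ++ l :: w) = u ++ l :: pvRtrim w := by
  simp only [pvRtrim, List.reverse_append, List.reverse_cons]
  rw [List.dropWhile_append]
  split
  · rename_i hemp
    exfalso
    have hnil : List.dropWhile pvBlank (w.reverse ++ [l]) = [] := by simpa using hemp
    have := List.dropWhile_eq_nil_iff.mp hnil l (by simp)
    simp [h] at this
  · rw [show List.dropWhile pvBlank (w.reverse ++ [l])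
        = List.dropWhile pvBlank w.reverse ++ l :: [] from
          dropWhile_append_middle pvBlank w.reverse [] l h]
    simp

theorem pvRtrim_all_blank (u : List String) (h : ∀ x ∈ u, pvBlank x = true) :
    pvRtrim u = [] := by
  simp only [pvRtrim, List.reverse_eq_nil_iff]
  rw [List.dropWhile_eq_nil_iff]
  intro x hx
  exact h x (List.mem_reverse.mp hx)

-- A's result is the canonical trim
theorem strip_newline_eq (block : List String) : strip_newline block = pvTrim block := by
  unfold strip_newline
  rw [pvCountBlanks_eq]
  have hsplit := List.takeWhile_append_dropWhile (p := pvBlank) (l := block)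
  set t := block.takeWhile pvBlank with ht
  set d := block.dropWhile pvBlank with hd
  have hdrop : block.drop t.length = d := by
    conv_lhs => rw [← hsplit]
    simp
  have hlen : t.length + d.length = block.length := by
    have := congrArg List.length hsplit
    simpa using this
  by_cases hcase : t.length = block.length
  · have hdnil : d = [] := by
      have : d.length = 0 := by omega
      exact List.eq_nil_of_length_eq_zero this
    simp [hcase, pvTrim, ← hd, hdnil, pvRtrim]
  · rw [if_neg hcase]
    rw [PySem.List.slice_from_natCast, hdrop, pvCountBlanks_eq]
    rw [PySem.List.slice_natCast, hdrop]
    have hsplit2 := List.takeWhile_append_dropWhile (p := pvBlank) (l := d.reverse)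
    set rt := d.reverse.takeWhile pvBlank with hrt
    set rd := d.reverse.dropWhile pvBlank with hrd
    have hd2 : d = rd.reverse ++ rt.reverse := by
      have : d.reverse.reverse = (rt ++ rd).reverse := by rw [hsplit2]
      simpa using this
    have hlen2 : rt.length + rd.length = d.length := by
      have := congrArg List.length hsplit2
      simpa using this
    have harith : block.length - rt.length - t.length = rd.reverse.length := by
      simp only [List.length_reverse]; omega
    rw [harith, hd2, List.take_left]
    simp [pvTrim, ← hd, pvRtrim, ← hrd]

-- B's loop once the body is nonempty
theorem pvLoopB_started (ls : List String) : ∀ body pending, body ≠ [] →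
    (∀ x ∈ pending, pvBlank x = true) →
    pvLoopB ls body pending = body ++ pvRtrim (pending ++ ls) := by
  induction ls with
  | nil =>
      intro body pending _ hp
      simp [pvLoopB, pvRtrim_all_blank pending hp]
  | cons l ls ih =>
      intro body pending hb hp
      have hbe : body.isEmpty = false := by cases body <;> simp_all
      by_cases h : pvBlank l = true
      · simp only [pvLoopB, h, if_true, hbe, Bool.false_eq_true, if_false]
        rw [ih body (pending ++ [l]) hb (by
          intro x hx
          rcases List.mem_append.mp hx with hx | hx
          · exact hp x hx
          · simp at hx; subst hx; exact h)]
        simp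
      · simp only [pvLoopB, h, Bool.false_eq_true, if_false]
        rw [ih (body ++ pending ++ [l]) [] (by simp) (by simp)]
        rw [show pending ++ l :: ls = pending ++ l :: ls from rfl,
          pvRtrim_append_nonblank pending ls l (by simpa using h)]
        simp

-- B's loop from the initial state computes the canonical trim
theorem pvLoopB_eq (block : List String) : pvLoopB block [] [] = pvTrim block := by
  induction block with
  | nil => simp [pvLoopB, pvTrim, pvRtrim]
  | cons l ls ih =>
      by_cases h : pvBlank l = true
      · simp only [pvLoopB, h, if_true, List.isEmpty_nil]
        rw [ih]
        simp [pvTrim, h]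
      · simp only [pvLoopB, h, Bool.false_eq_true, if_false, List.nil_append]
        rw [pvLoopB_started ls [l] [] (by simp) (by simp), List.nil_append]
        have heq : pvTrim (l :: ls) = l :: pvRtrim ls := by
          simp only [pvTrim, List.dropWhile_cons, h, Bool.false_eq_true, if_false]
          have := pvRtrim_append_nonblank [] ls l (by simpa using h)
          simpa using this
        simp [heq]

theorem join_cons (x : String) (xs : List String) :
    PySem.Str.join "" (x :: xs) = x ++ PySem.Str.join "" xs := by
  cases xs with
  | nil => simp [PySem.Str.join, PySem.Chars.join_singleton]
  | cons y ys =>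
      simp only [PySem.Str.join, List.map_cons, PySem.Chars.join_cons_cons,
        String.ofList_append, String.ofList_toList, String.append_empty]

-- A's string-building fold equals B's join of the prefixed lines
theorem foldl_eq_join (l : List String) : ∀ init : String,
    l.foldl (fun acc s => acc ++ ("    " ++ s)) init
      = init ++ PySem.Str.join "" (l.map (fun s => "    " ++ s)) := by
  induction l with
  | nil => intro init; simp [PySem.Str.join, PySem.Chars.join_nil]
  | cons x xs ih =>
      intro init
      simp only [List.foldl_cons, List.map_cons, join_cons, ih, String.append_assoc]

-- ===== VERDICT (by name: the statement is the Claim_ definition above) =====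
theorem write_code_spec : Claim_equal_write_code := by
  intro block lang _
  unfold Spec_write_code write_code write_code_alt
  rw [strip_newline_eq, pvLoopB_eq]
  by_cases h : pvTrim block = []
  · simp [h]
  · simp [h, foldl_eq_join, String.append_assoc]
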